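-- pv_equiv track=rewrite | github.com/debdattasarkar/DSA | 2. GFG/0. All/2. Strings/(M) String stack/py_sol.py | stringStack
-- ===== SOURCE A (Python) =====
-- def stringStack(pat, tar):
--     n, m = len(pat), len(tar)
--     if m == 0:
--         return True  # empty target is always possible
--
--     # Required parity for i1:
--     last_parity = (n - 1) & 1
--     first_parity = last_parity if (m & 1) else (last_parity ^ 1)
--
--     j = 0  # how many letters of tar matched
--     for i, c in enumerate(pat):
--         if j < m:
--             needed_parity = first_parity ^ (j & 1)  # alternate parity
--             if c == tar[j] and ((i & 1) == needed_parity):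
--                 j += 1
--
--     # All matched? If yes, tail parity is already satisfied by construction.
--     return j == m
-- ===== SOURCE B (Python) =====
-- def stringStack(pat, tar):
--     n, m = len(pat), len(tar)
--     if m == 0:
--         return True
--     k = m - 1
--     need = (n - 1) & 1
--     for i in range(n - 1, -1, -1):
--         if k >= 0 and pat[i] == tar[k] and (i & 1) == need:
--             k -= 1
--             need ^= 1
--     return k == -1
-- ===== Notes on version B (the rewrite author's own statement) =====
-- stated objective: alternative
-- what changed: Replaces A's forward greedy scan (matching tar from its first character with a parity derived from n and m) by a backward greedy scan of pat that matches tar from its last character, starting from the directly known parity (n-1)&1 and flipping it after each match; equivalence rests on the fact that both greedy directions decide the same subsequence-with-fixed-parities existence question.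
import Mathlib
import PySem

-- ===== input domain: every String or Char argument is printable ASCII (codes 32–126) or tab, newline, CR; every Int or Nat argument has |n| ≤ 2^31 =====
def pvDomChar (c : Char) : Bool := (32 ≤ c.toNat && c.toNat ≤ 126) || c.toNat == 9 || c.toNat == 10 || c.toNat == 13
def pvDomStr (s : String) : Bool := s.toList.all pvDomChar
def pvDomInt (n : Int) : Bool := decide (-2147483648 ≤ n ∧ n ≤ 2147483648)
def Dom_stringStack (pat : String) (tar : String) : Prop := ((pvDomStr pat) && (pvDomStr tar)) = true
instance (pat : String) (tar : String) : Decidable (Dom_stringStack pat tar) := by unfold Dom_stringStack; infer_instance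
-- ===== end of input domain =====

-- B replaces A's forward greedy parity-matched scan by a backward greedy scan of pat
-- matching tar from its last character (objective: alternative; same cost).

-- ===== PORT A =====
def stringStack (pat : String) (tar : String) : Bool :=
  let n : Int := PySem.Str.len pat
  let m : Int := PySem.Str.len tar
  if m = 0 then true
  else
    let last_parity : Int := PySem.Int.band (n - 1) 1
    let first_parity : Int := if PySem.Int.band m 1 ≠ 0 then last_parity else PySem.Int.bxor last_parity 1
    let j : Int := (PySem.List.enumerate pat.toList).foldl
      (fun j ic =>
        if j < m then
          if PySem.Str.pyGet? tar j = some ic.2 ∧ PySem.Int.band ic.1 1 = PySem.Int.bxor first_parity (PySem.Int.band j 1)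
          then j + 1 else j
        else j) 0
    j == m

-- ===== PORT B =====
def stringStack_alt (pat : String) (tar : String) : Bool :=
  let n : Int := PySem.Str.len pat
  let m : Int := PySem.Str.len tar
  if m = 0 then true
  else
    let st : Int × Int := (PySem.List.pyRange (n - 1) (-1) (-1)).foldl
      (fun st i =>
        if 0 ≤ st.1 ∧ PySem.Str.pyGet? pat i = PySem.Str.pyGet? tar st.1 ∧ PySem.Int.band i 1 = st.2
        then (st.1 - 1, PySem.Int.bxor st.2 1) else st)
      (m - 1, PySem.Int.band (n - 1) 1)
    st.1 == -1

-- ===== PRECONDITION & SPEC =====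
def Spec_stringStack (pat : String) (tar : String) (out : Bool) : Prop := out = stringStack_alt pat tar
instance (pat : String) (tar : String) (out : Bool) : Decidable (Spec_stringStack pat tar out) := by unfold Spec_stringStack; infer_instance

-- ===== CLAIM (what is proved, stated in full; the proofs are below) =====
def Claim_equal_stringStack : Prop := ∀ (pat : String) (tar : String), Dom_stringStack pat tar → Spec_stringStack pat tar (stringStack pat tar)

-- ===== LEMMAS AND PROOFS =====

/-- parity of a natural index, as Python's `i & 1 == 1`. -/
def pvParity (i : Nat) : Bool := decide (i % 2 = 1)

/-- a parity bit as the Int Python carries. -/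
def pvBI (b : Bool) : Int := if b then 1 else 0

/-- tar annotated with the required parity of each match position. -/
def pvTP (fp : Bool) (T : List Char) : List (Bool × Char) :=
  T.zipIdx.map (fun p => (fp.xor (pvParity p.2), p.1))

/-- generic greedy subsequence test (first-match). -/
def pvGr : List (Bool × Char) → List (Bool × Char) → Bool
  | _, [] => true
  | [], _ :: _ => false
  | x :: L, t :: ts => if x = t then pvGr L ts else pvGr L (t :: ts)

lemma pvGr_iff (L T : List (Bool × Char)) : pvGr L T = true ↔ T.Sublist L := by
  induction L generalizing T with
  | nil => cases T <;> simp [pvGr]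
  | cons x L ih =>
    cases T with
    | nil => simp [pvGr]
    | cons t ts =>
      by_cases h : x = t
      · subst h; simp [pvGr, ih, List.cons_sublist_cons]
      · simp only [pvGr, if_neg h, ih]
        constructor
        · exact fun hs => hs.cons x
        · intro hs
          rcases List.sublist_cons_iff.mp hs with hs' | ⟨r, hr, _⟩
          · exact hs'
          · exact absurd (by injection hr with h1 _; exact h1.symm) h

lemma pvBand1 (i : Nat) : PySem.Int.band (i : Int) 1 = pvBI (pvParity i) := by
  have h1 : ((1 : Int)) = ((1 : Nat) : Int) := rfl
  rw [h1, PySem.Int.band_natCast]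
  have : i &&& 1 = i % 2 := Nat.and_one_is_mod i
  rw [this]
  rcases Nat.mod_two_eq_zero_or_one i with h | h <;> simp [pvBI, pvParity, h]

lemma pvBI_inj (a b : Bool) : pvBI a = pvBI b ↔ a = b := by
  cases a <;> cases b <;> decide

lemma pvBxor1 (a : Bool) : PySem.Int.bxor (pvBI a) 1 = pvBI (!a) := by
  cases a <;> decide

lemma pvBxorBI (a b : Bool) : PySem.Int.bxor (pvBI a) (pvBI b) = pvBI (a.xor b) := by
  cases a <;> cases b <;> decide

lemma pvParity_succ (i : Nat) : pvParity (i + 1) = !pvParity i := by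
  rcases Nat.mod_two_eq_zero_or_one i with h | h <;>
    simp [pvParity, Nat.add_mod, h]

lemma pvTP_length (fp : Bool) (T : List Char) : (pvTP fp T).length = T.length := by
  simp [pvTP]

lemma pvTP_getElem (fp : Bool) (T : List Char) (k : Nat) (hk : k < T.length) :
    (pvTP fp T)[k]'(by simp [pvTP_length]; omega) = (fp.xor (pvParity k), T[k]) := by
  simp [pvTP]

/-- required parity of the last match position (n > 0). -/
def pvLast (n : Nat) : Bool := pvParity (n - 1)

/-- required parity of the first match position, as A computes it. -/
def pvFP (n m : Nat) : Bool := if m % 2 = 1 then pvLast n else !(pvLast n)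

lemma pvLast_eq_fp (n m : Nat) (hm : 0 < m) :
    (pvFP n m).xor (pvParity (m - 1)) = pvLast n := by
  rcases Nat.mod_two_eq_zero_or_one m with h | h
  · have h2 : (m - 1) % 2 = 1 := by omega
    simp [pvFP, pvParity, h, h2]
  · have h2 : (m - 1) % 2 = 0 := by omega
    simp [pvFP, pvParity, h, h2]

lemma pvFirst_eq (n m : Nat) (hn : 0 < n) :
    (if PySem.Int.band (m : Int) 1 ≠ 0 then PySem.Int.band ((n : Int) - 1) 1
     else PySem.Int.bxor (PySem.Int.band ((n : Int) - 1) 1) 1)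
    = pvBI (pvFP n m) := by
  have hc : ((n : Int) - 1) = ((n - 1 : Nat) : Int) := by omega
  rw [hc, pvBand1, pvBand1, pvBxor1]
  rcases Nat.mod_two_eq_zero_or_one m with h | h
  · have hp : pvParity m = false := by simp [pvParity, h]
    rw [hp, if_neg (by simp [pvBI])]
    unfold pvFP pvLast
    rw [if_neg (by omega)]
  · have hp : pvParity m = true := by simp [pvParity, h]
    rw [hp, if_pos (by simp [pvBI])]
    unfold pvFP pvLast
    rw [if_pos h]

lemma pvGr_nil_iff (R : List (Bool × Char)) : pvGr [] R = true ↔ R = [] := by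
  cases R <;> simp [pvGr]

-- A's fold starting from a full match stays there.
lemma pvA_stay (tar : String) (fpI M : Int) :
    ∀ (Q : List (Char × Nat)),
    (Q.foldl (fun jj p =>
        if jj < M then
          if PySem.Str.pyGet? tar jj = some p.1 ∧
             PySem.Int.band (p.2 : Int) 1 = PySem.Int.bxor fpI (PySem.Int.band jj 1)
          then jj + 1 else jj
        else jj) M) = M := by
  intro Q
  induction Q with
  | nil => rfl
  | cons x Q ih => simpa [List.foldl_cons] using ih

-- main loop invariant for port A's forward greedy scan
lemma pvA_loop (tar : String) (fp : Bool) :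
    ∀ (Q : List (Char × Nat)) (j : Nat), j ≤ tar.toList.length →
    ((Q.foldl (fun jj p =>
        if jj < (tar.toList.length : Int) then
          if PySem.Str.pyGet? tar jj = some p.1 ∧
             PySem.Int.band (p.2 : Int) 1 = PySem.Int.bxor (pvBI fp) (PySem.Int.band jj 1)
          then jj + 1 else jj
        else jj) (j : Int)) = (tar.toList.length : Int)
     ↔ pvGr (Q.map (fun p => (pvParity p.2, p.1))) ((pvTP fp tar.toList).drop j) = true) := by
  intro Q
  induction Q with
  | nil =>
    intro j hj
    simp only [List.foldl_nil, List.map_nil]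
    rw [pvGr_nil_iff, List.drop_eq_nil_iff, pvTP_length]
    constructor
    · intro h; omega
    · intro h; omega
  | cons p Q ih =>
    intro j hj
    by_cases hjm : j = tar.toList.length
    · subst hjm
      constructor
      · intro _
        have : (pvTP fp tar.toList).drop tar.toList.length = [] := by
          rw [List.drop_eq_nil_iff, pvTP_length]
        rw [this]; rfl
      · intro _
        simpa [List.foldl_cons] using pvA_stay tar (pvBI fp) (tar.toList.length : Int) Q
    · have hjlt : j < tar.toList.length := by omega
      have hd : (pvTP fp tar.toList).drop j
          = (fp.xor (pvParity j), tar.toList[j]) :: (pvTP fp tar.toList).drop (j + 1) := by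
        rw [List.drop_eq_getElem_cons (by rw [pvTP_length]; exact hjlt)]
        rw [pvTP_getElem fp tar.toList j hjlt]
      have hcond : (PySem.Str.pyGet? tar (j : Int) = some p.1 ∧
            PySem.Int.band (p.2 : Int) 1 = PySem.Int.bxor (pvBI fp) (PySem.Int.band (j : Int) 1))
          ↔ ((pvParity p.2, p.1) = (fp.xor (pvParity j), tar.toList[j])) := by
        rw [PySem.Str.pyGet?_natCast, List.getElem?_eq_getElem hjlt,
            pvBand1, pvBand1, pvBxorBI, pvBI_inj, Prod.ext_iff]
        simp only [Option.some.injEq]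
        constructor
        · rintro ⟨h1, h2⟩; exact ⟨h2, h1.symm⟩
        · rintro ⟨h1, h2⟩; exact ⟨h2.symm, h1⟩
      rw [List.map_cons, hd]
      simp only [List.foldl_cons, if_pos (show (j : Int) < (tar.toList.length : Int) by exact_mod_cast hjlt)]
      by_cases hc : (pvParity p.2, p.1) = (fp.xor (pvParity j), tar.toList[j])
      · rw [if_pos (hcond.mpr hc)]
        have hcast : ((j : Int) + 1) = ((j + 1 : Nat) : Int) := by push_cast; ring
        rw [hcast, ih (j + 1) (by omega)]
        show _ ↔ pvGr _ _ = true
        rw [pvGr, if_pos hc]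
      · rw [if_neg (fun h => hc (hcond.mp h))]
        rw [ih j (by omega), hd]
        show _ ↔ pvGr _ _ = true
        rw [pvGr, if_neg hc]

-- main loop invariant for port B's backward greedy scan
lemma pvB_loop (tar : String) (fp : Bool) :
    ∀ (Q : List (Bool × Char)) (k need : Int), -1 ≤ k → k < (tar.toList.length : Int) →
    (0 ≤ k → need = pvBI (fp.xor (pvParity k.toNat))) →
    (((Q.foldl (fun st x =>
        if 0 ≤ st.1 ∧ some x.2 = PySem.Str.pyGet? tar st.1 ∧ pvBI x.1 = st.2
        then (st.1 - 1, PySem.Int.bxor st.2 1) else st) (k, need)).1 = -1)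
     ↔ pvGr Q ((pvTP fp tar.toList).reverse.drop (tar.toList.length - (k + 1).toNat)) = true) := by
  intro Q
  induction Q with
  | nil =>
    intro k need hk1 hk2 _
    simp only [List.foldl_nil]
    rw [pvGr_nil_iff, List.drop_eq_nil_iff, List.length_reverse, pvTP_length]
    omega
  | cons x Q ih =>
    intro k need hk1 hk2 hinv
    by_cases hk0 : 0 ≤ k
    · have hkn : k = ((k.toNat : Nat) : Int) := by omega
      have hklt : k.toNat < tar.toList.length := by omega
      have hd : (pvTP fp tar.toList).reverse.drop (tar.toList.length - (k + 1).toNat)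
          = (fp.xor (pvParity k.toNat), tar.toList[k.toNat])
            :: (pvTP fp tar.toList).reverse.drop (tar.toList.length - k.toNat) := by
        have hdlt : tar.toList.length - (k + 1).toNat < (pvTP fp tar.toList).reverse.length := by
          rw [List.length_reverse, pvTP_length]; omega
        rw [List.drop_eq_getElem_cons hdlt]
        congr 1
        · rw [List.getElem_reverse]
          simp only [pvTP_length]
          have hidx : tar.toList.length - 1 - (tar.toList.length - (k + 1).toNat) = k.toNat := by
            omega
          simp only [hidx]
          exact pvTP_getElem fp tar.toList k.toNat hklt
        · congr 1; omega
      have hcond : (0 ≤ k ∧ some x.2 = PySem.Str.pyGet? tar k ∧ pvBI x.1 = need)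
          ↔ (x = (fp.xor (pvParity k.toNat), tar.toList[k.toNat])) := by
        rw [hinv hk0, pvBI_inj]
        conv_lhs => rw [hkn]
        rw [PySem.Str.pyGet?_natCast, List.getElem?_eq_getElem hklt, Prod.ext_iff]
        simp only [Option.some.injEq]
        constructor
        · rintro ⟨_, h2, h3⟩; exact ⟨h3, h2⟩
        · rintro ⟨h1, h2⟩; exact ⟨by positivity, h2, h1⟩
      rw [hd]
      simp only [List.foldl_cons]
      by_cases hc : x = (fp.xor (pvParity k.toNat), tar.toList[k.toNat])
      · rw [if_pos (hcond.mpr hc)]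
        have hneed : PySem.Int.bxor need 1 = pvBI (!(fp.xor (pvParity k.toNat))) := by
          rw [hinv hk0, pvBxor1]
        have hstep := ih (k - 1) (PySem.Int.bxor need 1) (by omega) (by omega)
          (by intro h
              have hk1' : 1 ≤ k.toNat := by omega
              have : (k - 1).toNat = k.toNat - 1 := by omega
              rw [hneed, this]
              congr 1
              have := pvParity_succ (k.toNat - 1)
              rw [show k.toNat - 1 + 1 = k.toNat by omega] at this
              rw [this]
              cases fp <;> cases pvParity (k.toNat - 1) <;> rfl)
        rw [hstep]
        have harith : tar.toList.length - (k - 1 + 1).toNat = tar.toList.length - k.toNat := by omega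
        rw [harith]
        show _ ↔ pvGr _ _ = true
        rw [pvGr, if_pos hc]
      · rw [if_neg (fun h => hc (hcond.mp h))]
        rw [ih k need hk1 hk2 hinv, hd]
        show _ ↔ pvGr _ _ = true
        rw [pvGr, if_neg hc]
    · have hkm1 : k = -1 := by omega
      subst hkm1
      simp only [List.foldl_cons]
      rw [if_neg (by simp)]
      rw [ih (-1) need (by omega) hk2 (by intro h; omega)]
      show pvGr Q _ = true ↔ pvGr _ _ = true
      have : tar.toList.length - ((-1 : Int) + 1).toNat = tar.toList.length := by simp
      rw [this]
      have hnil : (pvTP fp tar.toList).reverse.drop tar.toList.length = [] := by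
        rw [List.drop_eq_nil_iff, List.length_reverse, pvTP_length]
      rw [hnil]
      simp [pvGr]

-- the reversed index scan of B enumerates the parity-annotated pattern in reverse
lemma pvRev_eq (P : List Char) :
    (List.range P.length).map
        (fun k => (pvParity (P.length - 1 - k), P.getD (P.length - 1 - k) 'a'))
    = (P.zipIdx.map (fun p => (pvParity p.2, p.1))).reverse := by
  apply List.ext_getElem
  · simp
  · intro q h1 h2
    have hq : q < P.length := by simpa using h1
    have hlen : (P.zipIdx.map (fun p => (pvParity p.2, p.1))).length = P.length := by simp
    rw [List.getElem_map, List.getElem_range, List.getElem_reverse, List.getElem_map,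
        List.getElem_zipIdx]
    simp only [hlen, Nat.zero_add]
    rw [List.getD_eq_getElem P 'a' (by omega)]

-- ===== VERDICT (by name: the statement is the Claim_ definition above) =====
theorem stringStack_spec : Claim_equal_stringStack := by
  unfold Claim_equal_stringStack
  intro pat tar _
  unfold Spec_stringStack stringStack stringStack_alt
  simp only [PySem.Str.len_eq]
  by_cases hm : ((tar.toList.length : Int)) = 0
  · rw [if_pos hm, if_pos hm]
  · rw [if_neg hm, if_neg hm]
    have hmpos : 0 < tar.toList.length := by omega
    by_cases hn : pat.toList.length = 0
    · -- empty pattern: both sides are false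
      have hP : pat.toList = [] := List.eq_nil_of_length_eq_zero hn
      rw [hP]
      rw [PySem.List.enumerate_nil, List.foldl_nil]
      simp only [List.length_nil, Nat.cast_zero]
      rw [PySem.List.pyRange_neg_one_eq_nil (by norm_num)]
      rw [List.foldl_nil]
      rw [Bool.eq_iff_iff, beq_iff_eq, beq_iff_eq]
      show (0 : Int) = _ ↔ ((tar.toList.length : Int) - 1) = -1
      omega
    · -- main case: both sides decide the same sublist question
      have hnpos : 0 < pat.toList.length := by omega
      rw [pvFirst_eq pat.toList.length tar.toList.length hnpos]
      -- A side
      rw [PySem.List.enumerate_eq_zipIdx_map, List.foldl_map]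
      simp only [zero_add]
      have hA := pvA_loop tar (pvFP pat.toList.length tar.toList.length) pat.toList.zipIdx 0
        (by omega)
      simp only [Nat.cast_zero, List.drop_zero] at hA
      -- B side
      rw [PySem.List.pyRange_neg_one]
      rw [show ((pat.toList.length : Int) - 1 - (-1)).toNat = pat.toList.length by omega]
      rw [List.foldl_map]
      rw [PySem.List.foldl_congr_mem (List.range pat.toList.length) _
        (fun st k =>
          (fun (st : Int × Int) (x : Bool × Char) =>
            if 0 ≤ st.1 ∧ some x.2 = PySem.Str.pyGet? tar st.1 ∧ pvBI x.1 = st.2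
            then (st.1 - 1, PySem.Int.bxor st.2 1) else st) st
          ((fun k => (pvParity (pat.toList.length - 1 - k),
                      pat.toList.getD (pat.toList.length - 1 - k) 'a')) k)) _
        (by
          intro st k hk
          dsimp only
          have hklt : k < pat.toList.length := List.mem_range.mp hk
          have hcast : (pat.toList.length : Int) - 1 - (k : Int)
              = ((pat.toList.length - 1 - k : Nat) : Int) := by omega
          rw [hcast, pvBand1, PySem.Str.pyGet?_natCast,
              List.getElem?_eq_getElem (show pat.toList.length - 1 - k < pat.toList.length by omega),
              List.getD_eq_getElem pat.toList 'a'
                (show pat.toList.length - 1 - k < pat.toList.length by omega)])]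
      rw [← List.foldl_map
        (f := fun k => (pvParity (pat.toList.length - 1 - k),
                        pat.toList.getD (pat.toList.length - 1 - k) 'a'))
        (g := fun (st : Int × Int) (x : Bool × Char) =>
            if 0 ≤ st.1 ∧ some x.2 = PySem.Str.pyGet? tar st.1 ∧ pvBI x.1 = st.2
            then (st.1 - 1, PySem.Int.bxor st.2 1) else st)]
      rw [pvRev_eq]
      have hB := pvB_loop tar (pvFP pat.toList.length tar.toList.length)
        ((pat.toList.zipIdx.map (fun p => (pvParity p.2, p.1))).reverse)
        ((tar.toList.length : Int) - 1)
        (PySem.Int.band ((pat.toList.length : Int) - 1) 1)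
        (by omega) (by omega)
        (by
          intro _
          have hc2 : ((pat.toList.length : Int) - 1) = ((pat.toList.length - 1 : Nat) : Int) := by
            omega
          rw [hc2, pvBand1]
          have : (((tar.toList.length : Int) - 1)).toNat = tar.toList.length - 1 := by omega
          rw [this]
          congr 1
          exact (pvLast_eq_fp pat.toList.length tar.toList.length hmpos).symm)
      rw [show tar.toList.length - (((tar.toList.length : Int) - 1) + 1).toNat = 0 by omega,
          List.drop_zero] at hB
      rw [Bool.eq_iff_iff, beq_iff_eq, beq_iff_eq, hA, hB, pvGr_iff, pvGr_iff,
          List.reverse_sublist]
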